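-- pv_equiv track=rewrite | github.com/zabroyan/stuff | Python/Master thesis/src/impl/Solution.py | get_prev_node
-- ===== SOURCE A (Python) =====
-- def get_prev_node(path, t, before_vertex=False):
--     """
--     Finds a node before time t
--     :param path: path
--     :param t: time
--     :param before_vertex: True if agent at time t at node and previous node is needed, False otherwise, default is False
--     :return: a node before time t
--     """
--     prev_node = path[0]
--     for n in path:
--         if n[1][0] <= t <= n[1][1]:
--             if not before_vertex:  # at vertex
--                 return n
--             else:
--                 return prev_node
--         if t > n[1][1]:
--             prev_node = n
--     return prev_node
-- ===== SOURCE B (Python) =====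
-- def get_prev_node(path, t, before_vertex=False):
--     def contains(n):
--         return n[1][0] <= t <= n[1][1]
--
--     # first node whose interval contains t, and the prefix strictly before it
--     hit = None
--     prefix = []
--     for n in path:
--         if contains(n):
--             hit = n
--             break
--         prefix.append(n)
--
--     if hit is not None and not before_vertex:
--         return hit
--     # last node (before the hit, or anywhere if no hit) already finished by t
--     for n in reversed(prefix):
--         if t > n[1][1]:
--             return n
--     return path[0]
-- ===== Notes on version B (the rewrite author's own statement) =====
-- stated objective: alternative
-- what changed: Replaces A's single pass with a running prev_node accumulator by a find-first-containing-interval pass followed by a backwards scan of the prefix for the last finished node, with path[0] as fallback.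
-- outside the precondition, e.g. on get_prev_node([], 0, False): A raises IndexError, B raises IndexError
import Mathlib
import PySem

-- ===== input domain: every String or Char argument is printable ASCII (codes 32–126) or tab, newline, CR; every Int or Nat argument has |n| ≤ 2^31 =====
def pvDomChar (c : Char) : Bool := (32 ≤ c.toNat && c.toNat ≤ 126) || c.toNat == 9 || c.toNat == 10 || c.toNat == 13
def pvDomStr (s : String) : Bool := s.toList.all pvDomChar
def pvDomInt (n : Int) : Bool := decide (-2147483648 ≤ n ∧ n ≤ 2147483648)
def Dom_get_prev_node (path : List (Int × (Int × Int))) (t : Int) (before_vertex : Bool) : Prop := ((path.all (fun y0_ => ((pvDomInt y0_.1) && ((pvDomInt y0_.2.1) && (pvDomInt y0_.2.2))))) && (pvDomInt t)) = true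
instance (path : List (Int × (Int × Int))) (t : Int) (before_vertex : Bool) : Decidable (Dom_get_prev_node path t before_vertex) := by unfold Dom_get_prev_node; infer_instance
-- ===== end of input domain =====

-- B replaces A's single accumulator pass by find-first-containing + backwards pref scan (alternative decomposition, same cost); A raises IndexError on empty path (excluded by Pre_).


-- ===== PORT A =====
-- A's for-loop: n steps over the list carrying the prev_node accumulator
def pvLoopA (t : Int) (bv : Bool) (prev : Int × (Int × Int)) : List (Int × (Int × Int)) → Int × (Int × Int)
  | [] => prev
  | n :: rest =>
    if n.2.1 ≤ t ∧ t ≤ n.2.2 then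
      (if bv = false then n else prev)
    else
      pvLoopA t bv (if t > n.2.2 then n else prev) rest

def get_prev_node (path : List (Int × (Int × Int))) (t : Int) (before_vertex : Bool) : Int × (Int × Int) :=
  match path with
  | [] => (0, (0, 0))   -- Python raises IndexError here (excluded by Pre_)
  | p0 :: _ => pvLoopA t before_vertex p0 path

-- ===== PORT B =====
def pvContains (t : Int) (n : Int × (Int × Int)) : Bool := decide (n.2.1 ≤ t ∧ t ≤ n.2.2)
def pvLate (t : Int) (n : Int × (Int × Int)) : Bool := decide (t > n.2.2)

def get_prev_node_alt (path : List (Int × (Int × Int))) (t : Int) (before_vertex : Bool) : Int × (Int × Int) :=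
  match path with
  | [] => (0, (0, 0))   -- Python raises IndexError here (excluded by Pre_)
  | p0 :: _ =>
    let pref := path.takeWhile (fun n => !(pvContains t n))
    match path.find? (pvContains t) with
    | some hit =>
      if before_vertex = false then hit
      else ((pref.reverse.find? (pvLate t)).getD p0)
    | none => ((pref.reverse.find? (pvLate t)).getD p0)

-- ===== PRECONDITION & SPEC =====
-- Pre_ excludes only the empty path, on which Python A raises IndexError.
def Pre_get_prev_node (path : List (Int × (Int × Int))) (t : Int) (before_vertex : Bool) : Prop := path ≠ []
instance (path : List (Int × (Int × Int))) (t : Int) (before_vertex : Bool) : Decidable (Pre_get_prev_node path t before_vertex) := by unfold Pre_get_prev_node; infer_instance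
def pvWitness_get_prev_node : (List (Int × (Int × Int))) × Int × Bool := ([(1, (0, 2)), (2, (3, 5))], 4, false)

def Spec_get_prev_node (path : List (Int × (Int × Int))) (t : Int) (before_vertex : Bool) (out : Int × (Int × Int)) : Prop := out = get_prev_node_alt path t before_vertex
instance (path : List (Int × (Int × Int))) (t : Int) (before_vertex : Bool) (out : Int × (Int × Int)) : Decidable (Spec_get_prev_node path t before_vertex out) := by unfold Spec_get_prev_node; infer_instance

-- ===== CLAIM (what is proved, stated in full; the proofs are below) =====
def Claim_equal_get_prev_node : Prop := ∀ (path : List (Int × (Int × Int))) (t : Int) (before_vertex : Bool), Dom_get_prev_node path t before_vertex → Pre_get_prev_node path t before_vertex → Spec_get_prev_node path t before_vertex (get_prev_node path t before_vertex)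

-- ===== LEMMAS AND PROOFS =====

-- A's accumulator loop equals: find first containing node; prev_node is the last
-- finished node in the non-containing pref, defaulting to the accumulator seed.
theorem pvLoopA_eq (t : Int) (bv : Bool) (l : List (Int × (Int × Int))) :
    ∀ prev, pvLoopA t bv prev l =
      match l.find? (pvContains t) with
      | some hit =>
        if bv = false then hit
        else (((l.takeWhile (fun n => !(pvContains t n))).reverse.find? (pvLate t)).getD prev)
      | none => (((l.takeWhile (fun n => !(pvContains t n))).reverse.find? (pvLate t)).getD prev) := by
  induction l with
  | nil => intro prev; simp [pvLoopA]
  | cons n rest ih =>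
    intro prev
    by_cases hc : n.2.1 ≤ t ∧ t ≤ n.2.2
    · simp [pvLoopA, hc, List.find?, pvContains, List.takeWhile]
    · have hcb : pvContains t n = false := by simp [pvContains, hc]
      have step : pvLoopA t bv prev (n :: rest)
          = pvLoopA t bv (if t > n.2.2 then n else prev) rest := by
        simp [pvLoopA, hc]
      rw [step, ih]
      have htw : (n :: rest).takeWhile (fun m => !(pvContains t m))
          = n :: rest.takeWhile (fun m => !(pvContains t m)) := by
        simp [List.takeWhile, hcb]
      have hfind : (n :: rest).find? (pvContains t) = rest.find? (pvContains t) := by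
        simp [List.find?, hcb]
      have hgetD :
          (((n :: rest).takeWhile (fun m => !(pvContains t m))).reverse.find? (pvLate t)).getD prev
          = (((rest.takeWhile (fun m => !(pvContains t m))).reverse.find? (pvLate t)).getD
              (if t > n.2.2 then n else prev)) := by
        rw [htw]
        simp only [List.reverse_cons, List.find?_append]
        by_cases hl : t > n.2.2
        · have : pvLate t n = true := by simp [pvLate, hl]
          cases hfr : (rest.takeWhile (fun m => !(pvContains t m))).reverse.find? (pvLate t) <;>
            simp [hl, this, hfr, List.find?]
        · have : pvLate t n = false := by simp [pvLate, hl]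
          cases hfr : (rest.takeWhile (fun m => !(pvContains t m))).reverse.find? (pvLate t) <;>
            simp [hl, this, hfr, List.find?]
      rw [hfind]
      cases hf : rest.find? (pvContains t) with
      | some hit =>
        by_cases hbv : bv = false
        · simp [hbv]
        · simp [hbv, hgetD]
      | none => simp [hgetD]

-- ===== VERDICT (by name: the statement is the Claim_ definition above) =====
theorem get_prev_node_spec : Claim_equal_get_prev_node := by
  intro path t bv _ hpre
  unfold Spec_get_prev_node
  match path with
  | [] => exact absurd rfl hpre
  | p0 :: rest =>
    show pvLoopA t bv p0 (p0 :: rest) = _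
    rw [pvLoopA_eq]
    simp only [get_prev_node_alt]
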